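-- pv_equiv track=rewrite | github.com/duochen/Python-Beginner | Lecture04/Labs/generator.py | countReds
-- ===== SOURCE A (Python) =====
-- def countReds(aList):
--     count = 0
--     for color, number in aList:
--         if color == 'black':
--             yield count
--             count = 0
--         else:
--             count += 1
--     yield count
-- ===== SOURCE B (Python) =====
-- def countReds(aList):
--     blacks = [i for i, (color, number) in enumerate(aList)
--               if color == 'black']
--     prev = -1
--     for i in blacks:
--         yield i - prev - 1
--         prev = i
--     yield len(aList) - prev - 1
-- ===== Notes on version B (the rewrite author's own statement) =====
-- stated objective: alternative
-- what changed: Replaces the streaming reset-to-zero counter with a two-pass index-table approach: first collect the indices of the 'black' entries, then emit each count as the gap between consecutive black indices (sentinel prev = -1) plus the trailing gap to the end of the list.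
import Mathlib
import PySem

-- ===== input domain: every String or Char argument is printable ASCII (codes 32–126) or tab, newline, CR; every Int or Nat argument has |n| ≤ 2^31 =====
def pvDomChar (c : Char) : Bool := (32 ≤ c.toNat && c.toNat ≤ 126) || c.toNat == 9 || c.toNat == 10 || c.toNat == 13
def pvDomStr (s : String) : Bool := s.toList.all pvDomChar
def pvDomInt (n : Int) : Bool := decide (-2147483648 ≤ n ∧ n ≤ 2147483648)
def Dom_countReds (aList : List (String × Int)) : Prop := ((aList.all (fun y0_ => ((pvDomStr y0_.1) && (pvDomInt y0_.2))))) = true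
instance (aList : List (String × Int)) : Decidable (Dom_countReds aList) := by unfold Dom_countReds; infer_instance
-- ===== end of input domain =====

-- B replaces A's streaming reset-counter with a black-index table and gap differences; objective: alternative decomposition, same cost.

-- ===== PORT A =====
-- A: one pass with a running counter, reset to 0 at each 'black'; final yield of the counter.
def countReds (aList : List (String × Int)) : List Int :=
  let st := aList.foldl
    (fun (acc : List Int × Int) (p : String × Int) =>
      if p.1 == "black" then (acc.1 ++ [acc.2], 0) else (acc.1, acc.2 + 1))
    ([], 0)
  st.1 ++ [st.2]

-- ===== PORT B =====
-- B: collect black indices, then yield gaps between consecutive black indices (sentinel prev = -1) and the trailing gap.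
def countReds_alt (aList : List (String × Int)) : List Int :=
  let blacks := (PySem.List.enumerate aList).filterMap
    (fun q => if q.2.1 == "black" then some q.1 else none)
  let st := blacks.foldl
    (fun (acc : List Int × Int) (i : Int) => (acc.1 ++ [i - acc.2 - 1], i))
    ([], -1)
  st.1 ++ [(aList.length : Int) - st.2 - 1]

-- ===== PRECONDITION & SPEC =====
def Spec_countReds (aList : List (String × Int)) (out : List Int) : Prop := out = countReds_alt aList
instance (aList : List (String × Int)) (out : List Int) : Decidable (Spec_countReds aList out) := by unfold Spec_countReds; infer_instance

-- ===== CLAIM (what is proved, stated in full; the proofs are below) =====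
def Claim_equal_countReds : Prop := ∀ (aList : List (String × Int)), Dom_countReds aList → Spec_countReds aList (countReds aList)

-- ===== LEMMAS AND PROOFS =====

-- the tail of A's computation, as a direct recursion on the list with current counter c
def pvTailA (l : List (String × Int)) (c : Int) : List Int :=
  match l with
  | [] => [c]
  | p :: t => if p.1 == "black" then c :: pvTailA t 0 else pvTailA t (c + 1)

theorem pvA_foldl_eq (l : List (String × Int)) (o : List Int) (c : Int) :
    (let st := l.foldl
      (fun (acc : List Int × Int) (p : String × Int) =>
        if p.1 == "black" then (acc.1 ++ [acc.2], 0) else (acc.1, acc.2 + 1)) (o, c)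
     st.1 ++ [st.2]) = o ++ pvTailA l c := by
  induction l generalizing o c with
  | nil => simp [pvTailA]
  | cons p t ih =>
    simp only [List.foldl_cons, pvTailA]
    by_cases h : p.1 == "black"
    · simp only [h, if_true, ih]
      simp
    · simp only [h, Bool.false_eq_true, if_false, ih]

-- B's fold with any starting output prefix: the prefix factors out
theorem pvB_fold_out (bs : List Int) (o : List Int) (prev : Int) :
    bs.foldl (fun (acc : List Int × Int) (i : Int) => (acc.1 ++ [i - acc.2 - 1], i)) (o, prev)
    = (o ++ (bs.foldl (fun (acc : List Int × Int) (i : Int) => (acc.1 ++ [i - acc.2 - 1], i)) ([], prev)).1,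
       (bs.foldl (fun (acc : List Int × Int) (i : Int) => (acc.1 ++ [i - acc.2 - 1], i)) ([], prev)).2) := by
  induction bs generalizing o prev with
  | nil => simp
  | cons b t ih =>
    simp only [List.foldl_cons]
    rw [ih]
    conv_rhs => rw [ih]
    simp

-- main invariant: B's gap computation over the blacks of l enumerated from k equals A's tail,
-- where the current red count is k - prev - 1
theorem pvMain (l : List (String × Int)) (k prev : Int) :
    (let bs := (PySem.List.enumerate l k).filterMap
        (fun q => if q.2.1 == "black" then some q.1 else none)
     let st := bs.foldl (fun (acc : List Int × Int) (i : Int) => (acc.1 ++ [i - acc.2 - 1], i)) ([], prev)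
     st.1 ++ [(k + (l.length : Int)) - st.2 - 1]) = pvTailA l (k - prev - 1) := by
  induction l generalizing k prev with
  | nil => simp [PySem.List.enumerate, pvTailA]
  | cons p t ih =>
    simp only [PySem.List.enumerate_cons, List.filterMap_cons, pvTailA]
    by_cases h : p.1 == "black"
    · simp only [h, if_true, List.foldl_cons]
      rw [pvB_fold_out]
      have hrec := ih (k + 1) k
      simp only at hrec ⊢
      rw [List.nil_append, List.append_assoc]
      rw [show (k : Int) + (((p :: t).length : Nat) : Int) = (k + 1) + ((t.length : Nat) : Int) by
        simp; ring]
      rw [show k + 1 - k - 1 = (0:Int) by ring] at hrec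
      rw [hrec, List.singleton_append]
    · simp only [h, Bool.false_eq_true, if_false]
      have hrec := ih (k + 1) prev
      simp only at hrec ⊢
      rw [show (k : Int) + (((p :: t).length : Nat) : Int) = (k + 1) + ((t.length : Nat) : Int) by
        simp; ring]
      rw [hrec]
      congr 1
      ring

-- ===== VERDICT (by name: the statement is the Claim_ definition above) =====
theorem countReds_spec : Claim_equal_countReds := by
  intro aList _
  unfold Spec_countReds countReds countReds_alt
  have hA := pvA_foldl_eq aList [] 0
  have hB := pvMain aList 0 (-1)
  simp only [List.nil_append] at hA hB ⊢
  rw [hA]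
  rw [show ((0 : Int) - (-1) - 1) = 0 by ring] at hB
  rw [← hB]
  norm_num
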